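-- pv_equiv track=rewrite | github.com/hivellm/py-env-security | migration.py | _calculate_compatibility_score
-- ===== SOURCE A (Python) =====
-- from typing import List, Dict, Any, Optional
--
-- def _calculate_compatibility_score(static_analysis: Dict[str, Any],
--                                  migration_issues: List[str]) -> int:
--     """Calculate compatibility score (0-100)."""
--     base_score = 100
--     vulnerabilities = static_analysis.get('vulnerabilities', [])
--
--     # Deduct points for vulnerabilities
--     for vuln in vulnerabilities:
--         if vuln['severity'] == 'critical':
--             base_score -= 20
--         elif vuln['severity'] == 'high':
--             base_score -= 10
--         elif vuln['severity'] == 'medium':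
--             base_score -= 5
--         else:
--             base_score -= 2
--
--     # Deduct points for migration issues
--     base_score -= len(migration_issues) * 5
--
--     return max(0, min(100, base_score))
-- ===== SOURCE B (Python) =====
-- def _calculate_compatibility_score(static_analysis, migration_issues):
--     """Calculate compatibility score (0-100)."""
--     vulnerabilities = static_analysis.get('vulnerabilities', [])
--     # Build a severity histogram in one pass, then combine with fixed weights.
--     counts = {}
--     for vuln in vulnerabilities:
--         sev = vuln['severity']
--         counts[sev] = counts.get(sev, 0) + 1
--     c = counts.get('critical', 0)
--     h = counts.get('high', 0)
--     m = counts.get('medium', 0)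
--     deduction = (20 * c + 10 * h + 5 * m
--                  + 2 * (len(vulnerabilities) - c - h - m)
--                  + 5 * len(migration_issues))
--     return max(0, min(100, 100 - deduction))
-- ===== Notes on version B (the rewrite author's own statement) =====
-- stated objective: alternative
-- what changed: Per-item if/elif score accumulation is replaced by building a severity histogram once and computing the deduction as a fixed-size weighted sum over the buckets, with the else branch expressed as the complement count.
import Mathlib
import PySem

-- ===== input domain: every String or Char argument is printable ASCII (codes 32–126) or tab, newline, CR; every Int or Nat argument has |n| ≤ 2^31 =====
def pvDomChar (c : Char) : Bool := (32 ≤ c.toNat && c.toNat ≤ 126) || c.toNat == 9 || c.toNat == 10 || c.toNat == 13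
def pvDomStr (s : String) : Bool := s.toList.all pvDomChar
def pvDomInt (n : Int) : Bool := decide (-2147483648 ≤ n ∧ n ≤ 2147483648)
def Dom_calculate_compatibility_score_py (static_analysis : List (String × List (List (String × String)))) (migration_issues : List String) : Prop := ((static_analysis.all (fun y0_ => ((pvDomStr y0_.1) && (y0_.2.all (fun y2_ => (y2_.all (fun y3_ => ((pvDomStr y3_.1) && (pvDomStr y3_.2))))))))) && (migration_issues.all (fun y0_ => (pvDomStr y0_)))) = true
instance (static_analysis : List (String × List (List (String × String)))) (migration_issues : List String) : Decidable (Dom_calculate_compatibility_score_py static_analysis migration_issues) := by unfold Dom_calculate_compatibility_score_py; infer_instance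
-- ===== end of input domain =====

-- B replaces the per-item if/elif accumulation by a severity histogram plus a fixed weighted sum (alternative decomposition, same cost).

-- ===== PORT A =====
def calculate_compatibility_score_py (static_analysis : List (String × List (List (String × String)))) (migration_issues : List String) : Int :=
  let vulnerabilities := PySem.Dict.getD (PySem.Dict.mk static_analysis) "vulnerabilities" []
  let base_score := vulnerabilities.foldl (fun b vuln =>
      let sev := PySem.Dict.getD (PySem.Dict.mk vuln) "severity" ""   -- vuln['severity']; Pre_ guarantees the key exists
      if sev = "critical" then b - 20
      else if sev = "high" then b - 10
      else if sev = "medium" then b - 5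
      else b - 2) (100 : Int)
  let base_score := base_score - (migration_issues.length : Int) * 5
  max 0 (min 100 base_score)

-- ===== PORT B =====
def calculate_compatibility_score_py_alt (static_analysis : List (String × List (List (String × String)))) (migration_issues : List String) : Int :=
  let vulnerabilities := PySem.Dict.getD (PySem.Dict.mk static_analysis) "vulnerabilities" []
  let counts := vulnerabilities.foldl (fun d vuln =>
      let sev := PySem.Dict.getD (PySem.Dict.mk vuln) "severity" ""   -- vuln['severity']; Pre_ guarantees the key exists
      d.modify sev 0 (· + 1)) (PySem.Dict.empty : PySem.Dict String Int)
  let c := counts.getD "critical" 0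
  let h := counts.getD "high" 0
  let m := counts.getD "medium" 0
  let deduction := 20 * c + 10 * h + 5 * m
      + 2 * ((vulnerabilities.length : Int) - c - h - m)
      + 5 * (migration_issues.length : Int)
  max 0 (min 100 (100 - deduction))

-- ===== PRECONDITION & SPEC =====
-- Pre_ excludes exactly the inputs where some vulnerability dict has no 'severity' key, on which A raises KeyError.
def Pre_calculate_compatibility_score_py (static_analysis : List (String × List (List (String × String)))) (migration_issues : List String) : Prop :=
  ∀ vuln ∈ PySem.Dict.getD (PySem.Dict.mk static_analysis) "vulnerabilities" [],
    (PySem.Dict.mk vuln).contains "severity" = true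
instance (static_analysis : List (String × List (List (String × String)))) (migration_issues : List String) : Decidable (Pre_calculate_compatibility_score_py static_analysis migration_issues) := by unfold Pre_calculate_compatibility_score_py; infer_instance
def pvWitness_calculate_compatibility_score_py : (List (String × List (List (String × String)))) × List String :=
  ([("vulnerabilities", [[("severity", "high")], [("severity", "low")]])], ["issue"])

def Spec_calculate_compatibility_score_py (static_analysis : List (String × List (List (String × String)))) (migration_issues : List String) (out : Int) : Prop := out = calculate_compatibility_score_py_alt static_analysis migration_issues
instance (static_analysis : List (String × List (List (String × String)))) (migration_issues : List String) (out : Int) : Decidable (Spec_calculate_compatibility_score_py static_analysis migration_issues out) := by unfold Spec_calculate_compatibility_score_py; infer_instance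

-- ===== CLAIM (what is proved, stated in full; the proofs are below) =====
def Claim_equal_calculate_compatibility_score_py : Prop := ∀ (static_analysis : List (String × List (List (String × String)))) (migration_issues : List String), Dom_calculate_compatibility_score_py static_analysis migration_issues → Pre_calculate_compatibility_score_py static_analysis migration_issues → Spec_calculate_compatibility_score_py static_analysis migration_issues (calculate_compatibility_score_py static_analysis migration_issues)

-- ===== LEMMAS AND PROOFS =====

-- A's fold subtracts, per item, the weight of its severity; relate it to counts over the mapped severity list.
theorem pv_foldl_weights (vulns : List (List (String × String))) (b : Int) :
    vulns.foldl (fun b vuln =>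
      let sev := PySem.Dict.getD (PySem.Dict.mk vuln) "severity" ""
      if sev = "critical" then b - 20
      else if sev = "high" then b - 10
      else if sev = "medium" then b - 5
      else b - 2) b
    = b - (20 * ((vulns.map (fun v => PySem.Dict.getD (PySem.Dict.mk v) "severity" "")).count "critical" : Int)
         + 10 * ((vulns.map (fun v => PySem.Dict.getD (PySem.Dict.mk v) "severity" "")).count "high" : Int)
         + 5 * ((vulns.map (fun v => PySem.Dict.getD (PySem.Dict.mk v) "severity" "")).count "medium" : Int)
         + 2 * ((vulns.length : Int)
              - ((vulns.map (fun v => PySem.Dict.getD (PySem.Dict.mk v) "severity" "")).count "critical" : Int)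
              - ((vulns.map (fun v => PySem.Dict.getD (PySem.Dict.mk v) "severity" "")).count "high" : Int)
              - ((vulns.map (fun v => PySem.Dict.getD (PySem.Dict.mk v) "severity" "")).count "medium" : Int))) := by
  induction vulns generalizing b with
  | nil => simp
  | cons v t ih =>
    simp only [List.foldl_cons, List.map_cons, List.length_cons]
    rw [ih]
    by_cases hc : PySem.Dict.getD (PySem.Dict.mk v) "severity" "" = "critical" <;>
      by_cases hh : PySem.Dict.getD (PySem.Dict.mk v) "severity" "" = "high" <;>
        by_cases hm : PySem.Dict.getD (PySem.Dict.mk v) "severity" "" = "medium" <;>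
          simp [hc, hh, hm] <;> push_cast <;> ring

theorem pv_counts_getD (vulns : List (List (String × String))) (d : PySem.Dict String Int) (k : String) :
    (vulns.foldl (fun d vuln =>
        PySem.Dict.modify d (PySem.Dict.getD (PySem.Dict.mk vuln) "severity" "") 0 (· + 1)) d).getD k 0
    = d.getD k 0 + ((vulns.map (fun v => PySem.Dict.getD (PySem.Dict.mk v) "severity" "")).count k : Int) := by
  induction vulns generalizing d with
  | nil => simp
  | cons v t ih =>
    simp only [List.foldl_cons, List.map_cons]
    rw [ih, PySem.Dict.getD_modify]
    rw [List.count_cons]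
    by_cases h : k = PySem.Dict.getD (PySem.Dict.mk v) "severity" ""
    · subst h; simp; ring
    · simp [h, Ne.symm h]

-- ===== VERDICT (by name: the statement is the Claim_ definition above) =====
theorem calculate_compatibility_score_py_spec : Claim_equal_calculate_compatibility_score_py := by
  intro static_analysis migration_issues _ _
  unfold Spec_calculate_compatibility_score_py
  unfold calculate_compatibility_score_py calculate_compatibility_score_py_alt
  simp only [pv_foldl_weights, pv_counts_getD, PySem.Dict.getD_empty]
  ring_nf
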